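-- pv_equiv track=rewrite | github.com/ruzzajv/PO-metodos-iniciais | aproximacao_de_vogel_v2.py | _diferenca_dois_menores
-- ===== SOURCE A (Python) =====
-- INF = 100_000_000
--
-- def _diferenca_dois_menores(valores: list[int]) -> int:
--     """Diferença entre os dois menores valores (O(n)); 0 se houver < 2 valores."""
--     menor1 = INF
--     menor2 = INF
--     for valor in valores:
--         if valor < menor1:
--             menor2 = menor1
--             menor1 = valor
--         elif valor < menor2:
--             menor2 = valor
--     if INF in [menor1, menor2]:
--         return 0
--     return menor2 - menor1
-- ===== SOURCE B (Python) =====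
-- INF = 100_000_000
--
-- def _diferenca_dois_menores(valores: list[int]) -> int:
--     """Diferença entre os dois menores valores reais (< INF); 0 se houver < 2."""
--     match sorted(v for v in valores if v < INF):
--         case [a, b, *_]:
--             return b - a
--         case _:
--             return 0
-- ===== Notes on version B (the rewrite author's own statement) =====
-- stated objective: simpler
-- what changed: Replaces the single-pass loop tracking two running minima against an INF sentinel by filter-out-values-below-INF, sort, and subtract the first two sorted elements.
import Mathlib
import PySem

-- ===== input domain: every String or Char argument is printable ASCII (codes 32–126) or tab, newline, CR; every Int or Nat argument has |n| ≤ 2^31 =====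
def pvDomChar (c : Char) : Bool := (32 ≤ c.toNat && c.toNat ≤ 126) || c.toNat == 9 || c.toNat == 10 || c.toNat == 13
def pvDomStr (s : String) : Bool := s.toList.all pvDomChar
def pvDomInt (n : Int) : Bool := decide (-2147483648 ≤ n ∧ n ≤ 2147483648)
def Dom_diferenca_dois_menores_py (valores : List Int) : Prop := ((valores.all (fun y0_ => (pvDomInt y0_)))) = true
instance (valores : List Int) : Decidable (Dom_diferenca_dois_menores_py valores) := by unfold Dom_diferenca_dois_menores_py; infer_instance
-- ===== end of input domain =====

-- B replaces A's two-sentinel running-minimum loop by filter + sort + take the first two: simpler, no INF bookkeeping (same O(n) vs O(n log n) is traded for clarity).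

-- ===== PORT A =====
-- A's loop body (the if/elif over the two running minima), named as a helper
def pvStep (m : Int × Int) (valor : Int) : Int × Int :=
  if valor < m.1 then (valor, m.1)
  else if valor < m.2 then (m.1, valor)
  else m

-- literal port of A: fold the loop body over the list starting from (INF, INF), then the sentinel test
def diferenca_dois_menores_py (valores : List Int) : Int :=
  let st := valores.foldl pvStep ((100000000 : Int), (100000000 : Int))
  if (100000000 : Int) = st.1 ∨ (100000000 : Int) = st.2 then 0 else st.2 - st.1

-- ===== PORT B =====
-- port of Source B: sort the values below INF, match on the first two
def diferenca_dois_menores_py_alt (valores : List Int) : Int :=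
  match PySem.List.sorted (valores.filter (fun v => decide (v < (100000000 : Int)))) (fun x => x) false with
  | a :: b :: _ => b - a
  | _ => 0

-- ===== PRECONDITION & SPEC =====
def Spec_diferenca_dois_menores_py (valores : List Int) (out : Int) : Prop := out = diferenca_dois_menores_py_alt valores
instance (valores : List Int) (out : Int) : Decidable (Spec_diferenca_dois_menores_py valores out) := by unfold Spec_diferenca_dois_menores_py; infer_instance

-- ===== CLAIM (what is proved, stated in full; the proofs are below) =====
def Claim_equal_diferenca_dois_menores_py : Prop := ∀ (valores : List Int), Dom_diferenca_dois_menores_py valores → Spec_diferenca_dois_menores_py valores (diferenca_dois_menores_py valores)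

-- ===== LEMMAS AND PROOFS =====

-- appending one element c ≥ b ≥ a does not change the first two of the sorted list
theorem pvTake2_sorted_drop (a b c : Int) (l : List Int) (hab : a ≤ b) (hbc : b ≤ c) :
    (PySem.List.sorted (a :: b :: c :: l) (fun x => x) false).take 2
      = (PySem.List.sorted (a :: b :: l) (fun x => x) false).take 2 := by
  have hlen := PySem.List.length_sorted (a :: b :: l) (fun x : Int => x) false
  rcases hmatch : PySem.List.sorted (a :: b :: l) (fun x => x) false with _ | ⟨x0, _ | ⟨x1, t⟩⟩
  · rw [hmatch] at hlen; simp at hlen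
  · rw [hmatch] at hlen; simp at hlen
  · have hperm : (x0 :: x1 :: t).Perm (a :: b :: l) := hmatch ▸ PySem.List.sorted_perm _ _ _
    have hpair : (x0 :: x1 :: t).Pairwise (fun p q : Int => p ≤ q) := by
      have := PySem.List.sorted_pairwise (a :: b :: l) (fun x : Int => x)
      rw [hmatch] at this; exact this
    rw [List.pairwise_cons] at hpair
    obtain ⟨hx0all, hpair1⟩ := hpair
    rw [List.pairwise_cons] at hpair1
    obtain ⟨hx1t, _⟩ := hpair1
    have hx01 : x0 ≤ x1 := hx0all x1 (by simp)
    have hx0t : ∀ y ∈ t, x0 ≤ y := fun y hy => hx0all y (by simp [hy])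
    have hhead := PySem.List.key_head_sorted_le _ (fun x : Int => x) hmatch
    have hx0a : x0 ≤ a := hhead a (by simp)
    -- the second sorted element is ≤ b (b is in the list together with some element ≤ a)
    have hx1b : x1 ≤ b := by
      by_cases hax : x0 = a
      · subst hax
        have herase : (x1 :: t).Perm ((x0 :: b :: l).erase x0) := by
          have := hperm.erase x0
          rwa [List.erase_cons_head] at this
        have hb : b ∈ x1 :: t := by
          rw [herase.mem_iff, List.erase_cons_head]
          simp
        rcases List.mem_cons.mp hb with h | h
        · exact le_of_eq h.symm
        · exact hx1t b h
      · have ha : a ∈ x0 :: x1 :: t := hperm.mem_iff.mpr (by simp)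
        rcases List.mem_cons.mp ha with h | h
        · exact absurd h.symm hax
        · rcases List.mem_cons.mp h with h' | h'
          · exact le_trans (le_of_eq h'.symm) hab
          · exact le_trans (hx1t a h') hab
    have key : PySem.List.sorted (a :: b :: c :: l) (fun x => x) false
        = x0 :: x1 :: PySem.List.sorted (c :: t) (fun x => x) false := by
      apply PySem.List.sorted_id_eq_of_perm_of_pairwise
      · have p1 : (PySem.List.sorted (c :: t) (fun x : Int => x) false).Perm (c :: t) :=
          PySem.List.sorted_perm _ _ _
        have q2 : (x0 :: x1 :: c :: t).Perm (x0 :: c :: x1 :: t) := (List.Perm.swap c x1 t).cons x0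
        have q3 : (x0 :: c :: x1 :: t).Perm (c :: x0 :: x1 :: t) := List.Perm.swap c x0 (x1 :: t)
        have q4 : (c :: x0 :: x1 :: t).Perm (c :: a :: b :: l) := hperm.cons c
        have q5 : (c :: a :: b :: l).Perm (a :: c :: b :: l) := List.Perm.swap a c (b :: l)
        have q7 : (a :: c :: b :: l).Perm (a :: b :: c :: l) := (List.Perm.swap b c l).cons a
        exact ((p1.cons x1).cons x0).trans (q2.trans (q3.trans (q4.trans (q5.trans q7))))
      · rw [List.pairwise_cons]
        constructor
        · intro y hy
          rcases List.mem_cons.mp hy with h | h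
          · exact h ▸ hx01
          · rcases List.mem_cons.mp ((PySem.List.mem_sorted _ _ _ _).mp h) with h' | h'
            · exact h' ▸ le_trans hx0a (le_trans hab hbc)
            · exact hx0t y h'
        · rw [List.pairwise_cons]
          refine ⟨?_, ?_⟩
          · intro y hy
            rcases List.mem_cons.mp ((PySem.List.mem_sorted _ _ _ _).mp hy) with h' | h'
            · exact h' ▸ le_trans hx1b hbc
            · exact hx1t y h'
          · exact PySem.List.sorted_pairwise _ _
    rw [key]
    simp

-- A's fold computes exactly the first two elements of the sorted list extended by the two seeds
theorem pvFold_eq_take2_sorted (l : List Int) (m1 m2 : Int) (h : m1 ≤ m2) :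
    (PySem.List.sorted (m1 :: m2 :: l) (fun x => x) false).take 2
      = [(List.foldl pvStep (m1, m2) l).1, (List.foldl pvStep (m1, m2) l).2] := by
  induction l generalizing m1 m2 with
  | nil =>
      rw [PySem.List.sorted_eq_self_of_pairwise _ _ (by simp [h])]
      simp
  | cons v l ih =>
      have hswap1 : (PySem.List.sorted (m1 :: m2 :: v :: l) (fun x : Int => x) false)
          = PySem.List.sorted (m1 :: v :: m2 :: l) (fun x => x) false :=
        PySem.List.sorted_eq_sorted_of_perm _ _ _ (fun x y hxy => hxy)
          ((List.Perm.swap v m2 l).cons m1)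
      have hswap2 : (PySem.List.sorted (m1 :: m2 :: v :: l) (fun x : Int => x) false)
          = PySem.List.sorted (v :: m1 :: m2 :: l) (fun x => x) false :=
        PySem.List.sorted_eq_sorted_of_perm _ _ _ (fun x y hxy => hxy)
          ((List.Perm.swap v m2 l).cons m1 |>.trans (List.Perm.swap v m1 (m2 :: l)))
      simp only [List.foldl_cons]
      by_cases h1 : v < m1
      · have : pvStep (m1, m2) v = (v, m1) := by simp [pvStep, h1]
        rw [this, hswap2, pvTake2_sorted_drop v m1 m2 l (le_of_lt h1) h,
          ih v m1 (le_of_lt h1)]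
      · by_cases h2 : v < m2
        · have : pvStep (m1, m2) v = (m1, v) := by simp [pvStep, h1, h2]
          rw [this, hswap1, pvTake2_sorted_drop m1 v m2 l (not_lt.mp h1) (le_of_lt h2),
            ih m1 v (not_lt.mp h1)]
        · have : pvStep (m1, m2) v = (m1, m2) := by simp [pvStep, h1, h2]
          rw [this, pvTake2_sorted_drop m1 m2 v l h (not_lt.mp h2), ih m1 m2 h]

-- the sorted sentinel list splits into the sorted small values followed by the sorted large part
theorem pvSorted_split (l : List Int) :
    PySem.List.sorted ((100000000 : Int) :: (100000000 : Int) :: l) (fun x => x) false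
      = PySem.List.sorted (l.filter (fun v => decide (v < (100000000 : Int)))) (fun x => x) false
        ++ PySem.List.sorted ((100000000 : Int) :: (100000000 : Int) :: l.filter (fun v => !decide (v < (100000000 : Int)))) (fun x => x) false := by
  apply PySem.List.sorted_id_eq_of_perm_of_pairwise
  · have p1 := PySem.List.sorted_perm (l.filter (fun v => decide (v < (100000000 : Int)))) (fun x : Int => x) false
    have p2 := PySem.List.sorted_perm ((100000000 : Int) :: (100000000 : Int) :: l.filter (fun v => !decide (v < (100000000 : Int)))) (fun x : Int => x) false
    refine (p1.append p2).trans ?_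
    refine List.perm_middle.trans ?_
    refine (List.Perm.cons _ List.perm_middle).trans ?_
    exact ((List.filter_append_perm _ l).cons _).cons _
  · rw [List.pairwise_append]
    refine ⟨PySem.List.sorted_pairwise _ _, PySem.List.sorted_pairwise _ _, ?_⟩
    intro x hx y hy
    have hx' : x ∈ l.filter (fun v => decide (v < (100000000 : Int))) :=
      (PySem.List.mem_sorted _ _ _ _).mp hx
    have hxlt : x < (100000000 : Int) := by
      have := List.of_mem_filter hx'; simpa using this
    have hy' := (PySem.List.mem_sorted _ _ _ _).mp hy
    have hyge : (100000000 : Int) ≤ y := by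
      rcases List.mem_cons.mp hy' with h | h
      · omega
      · rcases List.mem_cons.mp h with h | h
        · omega
        · have := List.of_mem_filter h; simp at this; omega
    exact le_trans (le_of_lt hxlt) hyge

-- the head of the sorted large part is the sentinel itself
theorem pvHead_large (l : List Int) {r0 : Int} {rt : List Int}
    (hm : PySem.List.sorted ((100000000 : Int) :: (100000000 : Int) :: l.filter (fun v => !decide (v < (100000000 : Int)))) (fun x => x) false = r0 :: rt) :
    r0 = (100000000 : Int) := by
  have hle := PySem.List.key_head_sorted_le _ (fun x : Int => x) hm (100000000 : Int) (by simp)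
  have hmem : r0 ∈ (100000000 : Int) :: (100000000 : Int) :: l.filter (fun v => !decide (v < (100000000 : Int))) := by
    rw [← PySem.List.mem_sorted _ (fun x : Int => x) false, hm]; simp
  have hge : (100000000 : Int) ≤ r0 := by
    rcases List.mem_cons.mp hmem with h | h
    · omega
    · rcases List.mem_cons.mp h with h | h
      · omega
      · have := List.of_mem_filter h; simp at this; omega
  have hle' : r0 ≤ (100000000 : Int) := hle
  omega

-- ===== VERDICT (by name: the statement is the Claim_ definition above) =====
theorem diferenca_dois_menores_py_spec : Claim_equal_diferenca_dois_menores_py := by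
  intro valores _
  unfold Spec_diferenca_dois_menores_py diferenca_dois_menores_py diferenca_dois_menores_py_alt
  dsimp only
  have hfold := pvFold_eq_take2_sorted valores (100000000 : Int) (100000000 : Int) le_rfl
  rw [pvSorted_split valores] at hfold
  have hlenR := PySem.List.length_sorted ((100000000 : Int) :: (100000000 : Int) :: valores.filter (fun v => !decide (v < (100000000 : Int)))) (fun x : Int => x) false
  rcases hR : PySem.List.sorted ((100000000 : Int) :: (100000000 : Int) :: valores.filter (fun v => !decide (v < (100000000 : Int)))) (fun x => x) false with _ | ⟨r0, _ | ⟨r1, rt⟩⟩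
  · rw [hR] at hlenR; simp at hlenR
  · rw [hR] at hlenR; simp at hlenR
  · have hr0 : r0 = (100000000 : Int) := pvHead_large valores hR
    rw [hR] at hfold
    rcases hF : PySem.List.sorted (valores.filter (fun v => decide (v < (100000000 : Int)))) (fun x => x) false with _ | ⟨x0, _ | ⟨x1, t⟩⟩
    · rw [hF] at hfold
      simp at hfold
      simp [← hfold.1, hr0]
    · rw [hF] at hfold
      simp at hfold
      simp [← hfold.2, hr0]
    · rw [hF] at hfold
      simp at hfold
      have hx0 : x0 ∈ valores.filter (fun v => decide (v < (100000000 : Int))) := by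
        rw [← PySem.List.mem_sorted _ (fun x : Int => x) false, hF]; simp
      have hx1 : x1 ∈ valores.filter (fun v => decide (v < (100000000 : Int))) := by
        rw [← PySem.List.mem_sorted _ (fun x : Int => x) false, hF]; simp
      have hx0lt : x0 < (100000000 : Int) := by have := List.of_mem_filter hx0; simpa using this
      have hx1lt : x1 < (100000000 : Int) := by have := List.of_mem_filter hx1; simpa using this
      rw [← hfold.1, ← hfold.2]
      have : ¬((100000000 : Int) = x0 ∨ (100000000 : Int) = x1) := by omega
      simp [this]
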